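-- pv_equiv track=rewrite | github.com/TheIllusionOfLife/Eureka | mad_spark_multiagent/enhanced_reasoning.py | _check_sequential_workflow
-- ===== SOURCE A (Python) =====
-- from typing import Dict, List, Any, Optional, Union, TypedDict
--
-- def _check_sequential_workflow(agent_sequence: List[str]) -> bool:
--     """Check if agents follow expected sequential workflow."""
--     expected_sequence = ['idea_generator', 'critic', 'advocate', 'skeptic']
--
--     # Find the longest matching subsequence
--     matches = 0
--     seq_index = 0
--
--     for agent in agent_sequence:
--         if seq_index < len(expected_sequence) and agent == expected_sequence[seq_index]:
--             matches += 1
--             seq_index += 1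
--
--     return matches >= 3  # At least 3 agents in correct order
-- ===== SOURCE B (Python) =====
-- def _check_sequential_workflow(agent_sequence):
--     """Check if agents follow expected sequential workflow."""
--     it = iter(agent_sequence)
--     # matches >= 3 in A is exactly: the first three expected agents occur
--     # in order; each `target in it` consumes the shared iterator.
--     return all(target in it for target in ['idea_generator', 'critic', 'advocate'])
-- ===== Notes on version B (the rewrite author's own statement) =====
-- stated objective: idiomatic
-- what changed: Replaced the index+counter loop over agents with a loop over the three required agent names, each consuming a shared iterator of the sequence (greedy in-order subsequence test); the 4th expected name, which can never affect the >=3 result, is dropped.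
import Mathlib
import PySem

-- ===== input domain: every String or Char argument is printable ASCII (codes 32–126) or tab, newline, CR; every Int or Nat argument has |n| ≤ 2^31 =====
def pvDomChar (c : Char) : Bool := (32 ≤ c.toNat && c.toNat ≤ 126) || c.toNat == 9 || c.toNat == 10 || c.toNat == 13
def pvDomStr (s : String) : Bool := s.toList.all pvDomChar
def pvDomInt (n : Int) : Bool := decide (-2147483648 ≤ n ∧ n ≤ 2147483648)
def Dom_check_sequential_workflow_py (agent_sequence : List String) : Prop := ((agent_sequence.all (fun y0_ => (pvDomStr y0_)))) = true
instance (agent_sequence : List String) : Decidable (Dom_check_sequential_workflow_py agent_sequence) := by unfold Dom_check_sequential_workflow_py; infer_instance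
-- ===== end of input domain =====

-- B replaces the index+counter scan over agents with a loop over the three required
-- agent names, each consuming a shared "iterator" (remaining list): more idiomatic.


-- ===== PORT A =====
-- A's expected sequence
def pvExpectedA : List String := ["idea_generator", "critic", "advocate", "skeptic"]

-- the for-loop over agents with state (matches, seq_index)
def check_sequential_workflow_py (agent_sequence : List String) : Bool :=
  let st := agent_sequence.foldl
    (fun (p : Nat × Nat) agent =>
      if p.2 < pvExpectedA.length ∧ agent = pvExpectedA.getD p.2 "" then
        (p.1 + 1, p.2 + 1)
      else p)
    (0, 0)
  decide (3 ≤ st.1)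

-- ===== PORT B =====
-- `target in it`: scan the remaining list for target, returning what is left after it
def pvFindConsume (target : String) : List String → Option (List String)
  | [] => none
  | a :: rest => if a = target then some rest else pvFindConsume target rest

-- `all(target in it for target in targets)` with the shared iterator
def pvAllConsume : List String → List String → Bool
  | [], _ => true
  | t :: ts, s =>
    match pvFindConsume t s with
    | none => false
    | some rest => pvAllConsume ts rest

def check_sequential_workflow_py_alt (agent_sequence : List String) : Bool :=
  pvAllConsume ["idea_generator", "critic", "advocate"] agent_sequence

-- ===== PRECONDITION & SPEC =====
def Spec_check_sequential_workflow_py (agent_sequence : List String) (out : Bool) : Prop := out = check_sequential_workflow_py_alt agent_sequence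
instance (agent_sequence : List String) (out : Bool) : Decidable (Spec_check_sequential_workflow_py agent_sequence out) := by unfold Spec_check_sequential_workflow_py; infer_instance

-- ===== CLAIM (what is proved, stated in full; the proofs are below) =====
def Claim_equal_check_sequential_workflow_py : Prop := ∀ (agent_sequence : List String), Dom_check_sequential_workflow_py agent_sequence → Spec_check_sequential_workflow_py agent_sequence (check_sequential_workflow_py agent_sequence)

-- ===== LEMMAS AND PROOFS =====

-- one-element-at-a-time subsequence test, the bridge between the two loops
def pvSubseq : List String → List String → Bool
  | [], _ => true
  | _ :: _, [] => false
  | t :: ts, a :: rest =>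
    if a = t then pvSubseq ts rest else pvSubseq (t :: ts) rest

-- B's consume-per-target loop computes the same as the one-step subsequence test
theorem pvAllConsume_eq_subseq : ∀ (s ts : List String), pvAllConsume ts s = pvSubseq ts s := by
  intro s
  induction s with
  | nil => intro ts; cases ts <;> simp [pvAllConsume, pvSubseq, pvFindConsume]
  | cons a rest ih =>
    intro ts
    cases ts with
    | nil => simp [pvAllConsume, pvSubseq]
    | cons t ts' =>
      by_cases h : a = t
      · simp [pvAllConsume, pvSubseq, pvFindConsume, h, ih ts']
      · simp only [pvAllConsume, pvSubseq, pvFindConsume, if_neg h]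
        have := ih (t :: ts')
        simp [pvAllConsume] at this
        exact this

-- A's loop, tracking only the index (matches always equals seq_index when started equal)
def pvLoopA : List String → Nat → Nat
  | [], i => i
  | a :: s, i =>
    if i < pvExpectedA.length ∧ a = pvExpectedA.getD i "" then pvLoopA s (i + 1)
    else pvLoopA s i

theorem pvLoopA_mono : ∀ (s : List String) (i : Nat), i ≤ pvLoopA s i := by
  intro s
  induction s with
  | nil => intro i; simp [pvLoopA]
  | cons a s ih =>
    intro i
    simp only [pvLoopA]
    split
    · exact le_trans (Nat.le_succ i) (ih (i + 1))
    · exact ih i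

theorem pvFoldA_eq_loop : ∀ (s : List String) (m i : Nat),
    s.foldl (fun (p : Nat × Nat) agent =>
      if p.2 < pvExpectedA.length ∧ agent = pvExpectedA.getD p.2 "" then (p.1 + 1, p.2 + 1)
      else p) (m, i)
    = (m + (pvLoopA s i - i), pvLoopA s i) := by
  intro s
  induction s with
  | nil => intro m i; simp [pvLoopA]
  | cons a s ih =>
    intro m i
    simp only [List.foldl, pvLoopA]
    split
    · rw [ih (m + 1) (i + 1)]
      have h := pvLoopA_mono s (i + 1)
      simp only [Prod.mk.injEq]
      exact ⟨by omega, trivial⟩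
    · exact ih m i

-- key: A's loop starting at index i reaches ≥ 3 iff B finds the remaining targets
theorem pvLoopA_key : ∀ (s : List String) (i : Nat), i ≤ 3 →
    decide (3 ≤ pvLoopA s i) = pvSubseq (["idea_generator", "critic", "advocate"].drop i) s := by
  intro s
  induction s with
  | nil =>
    intro i hi
    interval_cases i <;> simp [pvLoopA, pvSubseq]
  | cons a s ih =>
    intro i hi
    simp only [pvLoopA]
    interval_cases i
    · by_cases h : a = "idea_generator"
      · have h' : 0 < pvExpectedA.length ∧ a = pvExpectedA.getD 0 "" := by simp [pvExpectedA, h]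
        simp only [if_pos h']
        rw [ih 1 (by omega)]
        simp [pvSubseq, h]
      · have h' : ¬ (0 < pvExpectedA.length ∧ a = pvExpectedA.getD 0 "") := fun hc => h (by simpa [pvExpectedA] using hc.2)
        simp only [if_neg h']
        rw [ih 0 (by omega)]
        simp [pvSubseq, h]
    · by_cases h : a = "critic"
      · have h' : 1 < pvExpectedA.length ∧ a = pvExpectedA.getD 1 "" := by simp [pvExpectedA, h]
        simp only [if_pos h']
        rw [ih 2 (by omega)]
        simp [pvSubseq, h]
      · have h' : ¬ (1 < pvExpectedA.length ∧ a = pvExpectedA.getD 1 "") := fun hc => h (by simpa [pvExpectedA] using hc.2)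
        simp only [if_neg h']
        rw [ih 1 (by omega)]
        simp [pvSubseq, h]
    · by_cases h : a = "advocate"
      · have h' : 2 < pvExpectedA.length ∧ a = pvExpectedA.getD 2 "" := by simp [pvExpectedA, h]
        simp only [if_pos h']
        have h3 : 3 ≤ pvLoopA s 3 := pvLoopA_mono s 3
        simp [pvSubseq, h, h3]
      · have h' : ¬ (2 < pvExpectedA.length ∧ a = pvExpectedA.getD 2 "") := fun hc => h (by simpa [pvExpectedA] using hc.2)
        simp only [if_neg h']
        rw [ih 2 (by omega)]
        simp [pvSubseq, h]
    · -- i = 3 : already done regardless of what happens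
      have h3 : 3 ≤ pvLoopA s 3 := pvLoopA_mono s 3
      have h4 : 3 ≤ pvLoopA s 4 := le_trans (by omega) (pvLoopA_mono s 4)
      split <;> simp [pvSubseq, h3, h4]

-- ===== VERDICT (by name: the statement is the Claim_ definition above) =====
theorem check_sequential_workflow_py_spec : Claim_equal_check_sequential_workflow_py := by
  intro s _
  unfold Spec_check_sequential_workflow_py check_sequential_workflow_py check_sequential_workflow_py_alt
  rw [pvAllConsume_eq_subseq]
  have hf := pvFoldA_eq_loop s 0 0
  simp only [hf, Nat.sub_zero, Nat.zero_add]
  exact pvLoopA_key s 0 (by omega)
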